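-- pv_equiv track=rewrite | github.com/stvsever/COMPASS-Engine | tools/differential_diagnosis.py | _limit_unimodal_summaries
-- ===== SOURCE A (Python) =====
-- from typing import Dict, Any, Optional, List
--
-- def _limit_unimodal_summaries(summaries: List[Dict[str, Any]]) -> List[Dict[str, Any]]:
--     """Best-effort cap to keep unimodal text reasonable."""
--     max_chars = 6000
--     packed = []
--     total = 0
--     for item in summaries:
--         text = item.get("text", "")
--         size = len(text)
--         if total + size > max_chars and packed:
--             break
--         packed.append(item)
--         total += size
--     return packed
-- ===== SOURCE B (Python) =====
-- from itertools import accumulate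
-- from typing import Dict, Any, List
--
-- def _limit_unimodal_summaries(summaries: List[Dict[str, Any]]) -> List[Dict[str, Any]]:
--     """Best-effort cap to keep unimodal text reasonable."""
--     if not summaries:
--         return []
--     totals = accumulate(len(item.get("text", "")) for item in summaries)
--     count = sum(1 for t in totals if t <= 6000)
--     return summaries[:max(count, 1)]
-- ===== Notes on version B (the rewrite author's own statement) =====
-- stated objective: alternative
-- what changed: Replaces the conditional early-break accumulation loop with prefix sums via itertools.accumulate, counting how many cumulative totals fit the 6000-char budget and slicing summaries[:max(count, 1)] so the first item is always kept.
import Mathlib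
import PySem

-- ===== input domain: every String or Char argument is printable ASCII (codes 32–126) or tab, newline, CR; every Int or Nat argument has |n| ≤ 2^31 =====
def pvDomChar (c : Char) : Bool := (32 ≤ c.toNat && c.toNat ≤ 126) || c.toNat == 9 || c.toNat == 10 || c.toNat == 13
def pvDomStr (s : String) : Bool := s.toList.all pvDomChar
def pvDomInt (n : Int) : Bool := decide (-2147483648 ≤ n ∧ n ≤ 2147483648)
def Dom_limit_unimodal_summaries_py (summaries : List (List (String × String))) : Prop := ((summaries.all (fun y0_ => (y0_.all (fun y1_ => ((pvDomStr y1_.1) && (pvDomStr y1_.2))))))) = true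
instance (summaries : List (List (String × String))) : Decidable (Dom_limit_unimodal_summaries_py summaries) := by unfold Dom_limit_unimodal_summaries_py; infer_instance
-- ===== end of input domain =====

-- B replaces A's early-break accumulation loop with prefix sums (accumulate), a count of
-- in-budget totals, and one slice summaries[:max(count, 1)]; objective: alternative decomposition.

-- ===== PORT A =====
-- the loop 'for item in summaries: … break …' as structural recursion over (items, packed, total)
def pvGoA (items packed : List (List (String × String))) (total : Int) :
    List (List (String × String)) :=
  match items with
  | [] => packed
  | item :: rest =>
      let text := PySem.Dict.getD (PySem.Dict.mk item) "text" ""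
      let size := PySem.Str.len text
      if 6000 < total + size ∧ packed ≠ [] then packed
      else pvGoA rest (packed ++ [item]) (total + size)

def limit_unimodal_summaries_py (summaries : List (List (String × String))) :
    List (List (String × String)) :=
  pvGoA summaries [] 0

-- ===== PORT B =====
-- len(item.get("text", ""))
def pvSize (item : List (String × String)) : Int :=
  PySem.Str.len (PySem.Dict.getD (PySem.Dict.mk item) "text" "")

def limit_unimodal_summaries_py_alt (summaries : List (List (String × String))) :
    List (List (String × String)) :=
  match summaries with
  | [] => []
  | _ :: _ =>
      -- itertools.accumulate of the text lengths = tail of scanl (+) 0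
      let totals := (List.scanl (· + ·) 0 (summaries.map pvSize)).tail
      let count := totals.countP (fun t => t ≤ 6000)
      summaries.take (max count 1)

-- ===== PRECONDITION & SPEC =====
def Spec_limit_unimodal_summaries_py (summaries : List (List (String × String))) (out : List (List (String × String))) : Prop := out = limit_unimodal_summaries_py_alt summaries
instance (summaries : List (List (String × String))) (out : List (List (String × String))) : Decidable (Spec_limit_unimodal_summaries_py summaries out) := by unfold Spec_limit_unimodal_summaries_py; infer_instance

-- ===== CLAIM (what is proved, stated in full; the proofs are below) =====
def Claim_equal_limit_unimodal_summaries_py : Prop := ∀ (summaries : List (List (String × String))), Dom_limit_unimodal_summaries_py summaries → Spec_limit_unimodal_summaries_py summaries (limit_unimodal_summaries_py summaries)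

-- ===== LEMMAS AND PROOFS =====

-- number of further items A still packs when the running total is `total` and packed is nonempty
def pvCnt (items : List (List (String × String))) (total : Int) : Nat :=
  match items with
  | [] => 0
  | item :: rest =>
      if 6000 < total + pvSize item then 0 else pvCnt rest (total + pvSize item) + 1

theorem pvGoA_cons (x : List (String × String)) (xs packed : List (List (String × String)))
    (total : Int) :
    pvGoA (x :: xs) packed total =
      if 6000 < total + pvSize x ∧ packed ≠ [] then packed
      else pvGoA xs (packed ++ [x]) (total + pvSize x) := rfl

theorem pvSize_nonneg (item : List (String × String)) : 0 ≤ pvSize item := by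
  simp [pvSize, PySem.Str.len_eq]

theorem pvCnt_eq_zero (items : List (List (String × String))) (total : Int)
    (h : 6000 < total) : pvCnt items total = 0 := by
  cases items with
  | nil => rfl
  | cons x xs =>
      have := pvSize_nonneg x
      simp only [pvCnt, if_pos (by omega : (6000:Int) < total + pvSize x)]

theorem pvGoA_eq (items : List (List (String × String))) :
    ∀ (packed : List (List (String × String))) (total : Int), packed ≠ [] →
      pvGoA items packed total = packed ++ items.take (pvCnt items total) := by
  induction items with
  | nil => intro packed total _; simp [pvGoA, pvCnt]
  | cons x xs ih =>
      intro packed total hp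
      rw [pvGoA_cons]
      by_cases h : (6000:Int) < total + pvSize x
      · simp [pvCnt, h, hp]
      · rw [if_neg (by simp [h, hp]), ih (packed ++ [x]) (total + pvSize x) (by simp)]
        simp [pvCnt, h, List.take_succ_cons]

theorem pvScan_count (items : List (List (String × String))) :
    ∀ total : Int,
      (List.scanl (· + ·) total (items.map pvSize)).countP (fun t => t ≤ 6000)
        = (if total ≤ 6000 then 1 else 0) + pvCnt items total := by
  induction items with
  | nil => intro total; simp [pvCnt, List.countP_cons]
  | cons x xs ih =>
      intro total
      rw [List.map_cons, List.scanl_cons, List.countP_cons, ih (total + pvSize x)]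
      by_cases h : (6000:Int) < total + pvSize x
      · have h0 : pvCnt xs (total + pvSize x) = 0 := pvCnt_eq_zero _ _ h
        simp [pvCnt, h, h0, show ¬(total + pvSize x ≤ 6000) from by omega]
      · simp only [pvCnt, if_neg h, if_pos (show total + pvSize x ≤ 6000 from by omega),
          decide_eq_true_eq]
        split_ifs <;> omega

-- ===== VERDICT (by name: the statement is the Claim_ definition above) =====
theorem limit_unimodal_summaries_py_spec : Claim_equal_limit_unimodal_summaries_py := by
  intro summaries _
  unfold Spec_limit_unimodal_summaries_py limit_unimodal_summaries_py limit_unimodal_summaries_py_alt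
  cases summaries with
  | nil => rfl
  | cons x xs =>
      rw [pvGoA_cons, if_neg (by simp),
        pvGoA_eq xs ([] ++ [x]) (0 + pvSize x) (by simp)]
      simp only [List.map_cons, List.scanl_cons, List.tail_cons, List.nil_append]
      rw [pvScan_count]
      simp only [zero_add]
      by_cases h : (6000:Int) < pvSize x
      · have h0 : pvCnt xs (pvSize x) = 0 := pvCnt_eq_zero _ _ h
        rw [if_neg (by omega)]
        simp [h0]
      · rw [if_pos (by omega)]
        have hm : max (1 + pvCnt xs (pvSize x)) 1 = pvCnt xs (pvSize x) + 1 := by omega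
        rw [hm, List.take_succ_cons]
        rfl
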